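-- pv_equiv track=rewrite | github.com/harshalyeole/OA | Cisco_FullStackIntern/q3.py | funcDrop
-- ===== SOURCE A (Python) =====
-- def funcDrop(xCoordinate, yCoordinate):
--     ans = 1
--     for i in range(len(xCoordinate)):
--         time = 1
--         for j in range(i + 1, len(xCoordinate)):
--             if xCoordinate[i] == xCoordinate[j]:
--                 time += 1
--         if time > ans:
--             ans = time
--     for i in range(len(yCoordinate)):
--         time = 1
--         for j in range(i+1, len(yCoordinate)):
--             if yCoordinate[i] == yCoordinate[j]:
--                 time+=1
--         if time > ans :
--             ans = time
--     return ans
-- ===== SOURCE B (Python) =====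
-- def funcDrop(xCoordinate, yCoordinate):
--     ans = 1
--     for coords in (xCoordinate, yCoordinate):
--         counts = {}
--         for v in coords:
--             counts[v] = counts.get(v, 0) + 1
--         for c in counts.values():
--             if c > ans:
--                 ans = c
--     return ans
-- ===== Notes on version B (the rewrite author's own statement) =====
-- stated objective: faster
-- what changed: Replaced A's nested tail-rescan per index with a single-pass dict counter per list followed by one max over its values.
import Mathlib
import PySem

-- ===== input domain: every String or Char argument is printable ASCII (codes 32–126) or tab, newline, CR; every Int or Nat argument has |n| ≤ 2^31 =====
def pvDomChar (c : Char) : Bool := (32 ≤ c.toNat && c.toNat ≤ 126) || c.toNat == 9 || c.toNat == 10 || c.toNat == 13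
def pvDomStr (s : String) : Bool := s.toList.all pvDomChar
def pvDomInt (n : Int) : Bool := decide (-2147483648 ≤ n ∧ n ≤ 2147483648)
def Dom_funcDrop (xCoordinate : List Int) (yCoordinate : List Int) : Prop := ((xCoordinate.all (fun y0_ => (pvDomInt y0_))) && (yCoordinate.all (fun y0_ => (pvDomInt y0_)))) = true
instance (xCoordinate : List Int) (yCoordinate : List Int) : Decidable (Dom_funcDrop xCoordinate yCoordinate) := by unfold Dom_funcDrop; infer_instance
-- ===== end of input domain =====

-- B replaces A's O(n^2) nested rescans with a one-pass dict counter per list and a max over its values.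

-- ===== PORT A =====
-- one quadratic pass over one coordinate list, carrying the running 'ans'
def funcDropScan (xs : List Int) (ans0 : Int) : Int :=
  (PySem.List.pyRange 0 (xs.length : Int) 1).foldl (fun ans i =>
    let time := (PySem.List.pyRange (i + 1) (xs.length : Int) 1).foldl (fun time j =>
      if PySem.List.pyGetD xs i 0 = PySem.List.pyGetD xs j 0 then time + 1 else time) 1
    if time > ans then time else ans) ans0

def funcDrop (xCoordinate : List Int) (yCoordinate : List Int) : Int :=
  funcDropScan yCoordinate (funcDropScan xCoordinate 1)

-- ===== PORT B =====
-- body of 'for coords in (xCoordinate, yCoordinate)': build the counter dict, then max its values into ans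
def funcDropBest (coords : List Int) (ans : Int) : Int :=
  let counts := coords.foldl (fun d v => d.insert v (d.getD v 0 + 1)) PySem.Dict.empty
  counts.values.foldl (fun a c => if c > a then c else a) ans

def funcDrop_alt (xCoordinate : List Int) (yCoordinate : List Int) : Int :=
  [xCoordinate, yCoordinate].foldl (fun ans coords => funcDropBest coords ans) 1

-- ===== PRECONDITION & SPEC =====
def Spec_funcDrop (xCoordinate : List Int) (yCoordinate : List Int) (out : Int) : Prop := out = funcDrop_alt xCoordinate yCoordinate
instance (xCoordinate : List Int) (yCoordinate : List Int) (out : Int) : Decidable (Spec_funcDrop xCoordinate yCoordinate out) := by unfold Spec_funcDrop; infer_instance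

-- ===== CLAIM (what is proved, stated in full; the proofs are below) =====
def Claim_equal_funcDrop : Prop := ∀ (xCoordinate : List Int) (yCoordinate : List Int), Dom_funcDrop xCoordinate yCoordinate → Spec_funcDrop xCoordinate yCoordinate (funcDrop xCoordinate yCoordinate)

-- ===== LEMMAS AND PROOFS =====

-- the list of A's per-index 'time' values, read off structurally
def timesList : List Int → List Int
  | [] => []
  | v :: t => (1 + (t.count v : Int)) :: timesList t

theorem if_gt_eq_max (a t : Int) : (if t > a then t else a) = max a t := by
  rw [max_def]; split_ifs <;> omega

theorem foldl_ifgt_eq_max (l : List Int) (ans : Int) :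
    l.foldl (fun a c => if c > a then c else a) ans = l.foldl max ans := by
  induction l generalizing ans with
  | nil => rfl
  | cons c t ih => rw [List.foldl_cons, if_gt_eq_max]; exact ih _

theorem funcDropBest_eq (xs : List Int) (ans : Int) :
    funcDropBest xs ans = ((PySem.Set.ofList xs).map (fun v => (xs.count v : Int))).foldl max ans := by
  show (PySem.Dict.counter xs).values.foldl (fun a c => if c > a then c else a) ans = _
  have hv : (PySem.Dict.counter xs).values = (PySem.Set.ofList xs).map (fun v => (xs.count v : Int)) := by
    simp only [PySem.Dict.values, PySem.Dict.items_counter, List.map_map]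
    rfl
  rw [hv, foldl_ifgt_eq_max]


theorem foldl_count (l : List Int) (c : Int) (n : Int) :
    l.foldl (fun acc v => if c = v then acc + 1 else acc) n = n + (l.count c : Int) := by
  induction l generalizing n with
  | nil => simp
  | cons v t ih =>
    by_cases h : c = v
    all_goals simp only [List.foldl_cons, if_pos, h, ih, List.count_cons]
    all_goals split_ifs with h2
    all_goals simp_all
    all_goals omega

theorem scan_aux (xs : List Int) : ∀ n k, xs.length - k = n → k ≤ xs.length → ∀ ans : Int,
    (PySem.List.pyRange (k : Int) (xs.length : Int) 1).foldl
      (fun ans i =>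
        let time := 1 + (((xs.drop (i.toNat + 1)).count (PySem.List.pyGetD xs i 0) : Int))
        if time > ans then time else ans) ans
    = (timesList (xs.drop k)).foldl max ans := by
  intro n
  induction n with
  | zero =>
    intro k hk hk2 ans
    have hkl : k = xs.length := by omega
    subst hkl
    rw [PySem.List.pyRange_one_eq_nil (by omega), List.drop_of_length_le (by omega)]
    rfl
  | succ n ih =>
    intro k hk hk2 ans
    have hklt : k < xs.length := by omega
    rw [PySem.List.pyRange_one_cons (by exact_mod_cast hklt)]
    rw [List.drop_eq_getElem_cons hklt]
    simp only [List.foldl_cons, timesList]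
    have h1 : ((k : Int) + 1) = ((k + 1 : Nat) : Int) := by push_cast; ring
    have h2 : (k : Int).toNat = k := Int.toNat_natCast k
    rw [h1, h2]
    have h3 : PySem.List.pyGetD xs ((k : Nat) : Int) 0 = xs[k] := by
      rw [PySem.List.pyGetD_natCast]
      exact List.getD_eq_getElem xs 0 hklt
    rw [h3, if_gt_eq_max, ih (k + 1) (by omega) (by omega)]

theorem funcDropScan_eq (xs : List Int) (ans : Int) :
    funcDropScan xs ans = (timesList xs).foldl max ans := by
  unfold funcDropScan
  have hcongr : ∀ (a : Int) (i : Int), i ∈ PySem.List.pyRange 0 (xs.length : Int) 1 →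
      (let time := (PySem.List.pyRange (i + 1) (xs.length : Int) 1).foldl (fun time j =>
        if PySem.List.pyGetD xs i 0 = PySem.List.pyGetD xs j 0 then time + 1 else time) 1
       if time > a then time else a)
      = (let time := 1 + (((xs.drop (i.toNat + 1)).count (PySem.List.pyGetD xs i 0) : Int))
         if time > a then time else a) := by
    intro a i hi
    have h0 : 0 ≤ i := (PySem.List.mem_pyRange_one.mp hi).1
    have hin : (PySem.List.pyRange (i + 1) (xs.length : Int) 1).foldl (fun time j =>
        if PySem.List.pyGetD xs i 0 = PySem.List.pyGetD xs j 0 then time + 1 else time) 1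
        = 1 + (((xs.drop (i.toNat + 1)).count (PySem.List.pyGetD xs i 0) : Int)) := by
      rw [PySem.List.foldl_pyRange_pyGetD' xs 0
        (fun acc v => if PySem.List.pyGetD xs i 0 = v then acc + 1 else acc) 1 (by omega)]
      rw [foldl_count]
      have ht : (i + 1).toNat = i.toNat + 1 := by omega
      rw [ht]
    rw [hin]
  refine Eq.trans (PySem.List.foldl_congr_mem _ _
    (fun ans i => let time := 1 + (((xs.drop (i.toNat + 1)).count (PySem.List.pyGetD xs i 0) : Int))
                  if time > ans then time else ans) ans hcongr) ?_
  have h0 := scan_aux xs xs.length 0 (by omega) (by omega) ans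
  simpa using h0

theorem foldl_max_eq_of_dominate (l₁ l₂ : List Int) (ans : Int)
    (h1 : ∀ x ∈ l₁, x ≤ l₂.foldl max ans)
    (h2 : ∀ x ∈ l₂, x ≤ l₁.foldl max ans) :
    l₁.foldl max ans = l₂.foldl max ans := by
  apply le_antisymm
  · rcases PySem.List.foldl_max_mem l₁ ans with h | h
    · rw [h]; exact (PySem.List.le_foldl_max l₂ ans).1
    · exact h1 _ h
  · rcases PySem.List.foldl_max_mem l₂ ans with h | h
    · rw [h]; exact (PySem.List.le_foldl_max l₁ ans).1
    · exact h2 _ h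

theorem timesList_le (xs : List Int) : ∀ x ∈ timesList xs, ∃ v ∈ xs, x ≤ (xs.count v : Int) := by
  induction xs with
  | nil => simp [timesList]
  | cons v t ih =>
    intro x hx
    rcases List.mem_cons.mp hx with hx | hx
    · subst hx
      exact ⟨v, List.mem_cons_self, by simp [List.count_cons_self]; omega⟩
    · obtain ⟨u, hu, hle⟩ := ih x hx
      refine ⟨u, List.mem_cons_of_mem _ hu, hle.trans ?_⟩
      simp only [List.count_cons]
      split_ifs <;> push_cast <;> omega

theorem count_le_timesList (xs : List Int) : ∀ v ∈ xs, ∃ x ∈ timesList xs, (xs.count v : Int) ≤ x := by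
  induction xs with
  | nil => simp
  | cons u t ih =>
    intro v hv
    by_cases hvu : v = u
    · subst hvu
      exact ⟨1 + (t.count v : Int), List.mem_cons_self, by push_cast [List.count_cons_self]; omega⟩
    · rcases List.mem_cons.mp hv with hv | hv
      · exact absurd hv hvu
      · obtain ⟨x, hx, hle⟩ := ih v hv
        refine ⟨x, List.mem_cons_of_mem _ hx, ?_⟩
        simpa [List.count_cons, Ne.symm hvu] using hle

theorem core (xs : List Int) (ans : Int) :
    (timesList xs).foldl max ans = ((PySem.Set.ofList xs).map (fun v => (xs.count v : Int))).foldl max ans := by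
  apply foldl_max_eq_of_dominate
  · intro x hx
    obtain ⟨v, hv, hle⟩ := timesList_le xs x hx
    have hm : (xs.count v : Int) ∈ (PySem.Set.ofList xs).map (fun v => (xs.count v : Int)) :=
      List.mem_map.mpr ⟨v, (PySem.Set.mem_ofList _ _).mpr hv, rfl⟩
    exact hle.trans ((PySem.List.le_foldl_max _ ans).2 _ hm)
  · intro c hc
    obtain ⟨v, hv, rfl⟩ := List.mem_map.mp hc
    obtain ⟨x, hx, hle⟩ := count_le_timesList xs v ((PySem.Set.mem_ofList _ _).mp hv)
    exact hle.trans ((PySem.List.le_foldl_max _ ans).2 _ hx)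

-- ===== VERDICT (by name: the statement is the Claim_ definition above) =====
theorem funcDrop_spec : Claim_equal_funcDrop := by
  intro xs ys _
  unfold Spec_funcDrop funcDrop funcDrop_alt
  simp only [List.foldl]
  rw [funcDropScan_eq, funcDropScan_eq, funcDropBest_eq, funcDropBest_eq, core, core]
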